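-- pv_equiv track=rewrite | github.com/Gnoule/Coco-fortis | main/Graph.py | extract_shapes_with_value
-- ===== SOURCE A (Python) =====
-- from collections import deque
--
-- def extract_shapes_with_value(grid):
--
--     visited = [[False] * len(row) for row in grid]
--     shapes = []
--
--     def bfs(y, x, value):
--         queue = deque([(y, x)])
--         coords = []
--
--         while queue:
--             cy, cx = queue.popleft()
--             if (0 <= cy < len(grid) and
--                 0 <= cx < len(grid[cy]) and
--                 not visited[cy][cx] and
--                 grid[cy][cx] == value):
--                 visited[cy][cx] = True
--                 coords.append((cy, cx))
--                 for dy, dx in [(-1,0),(1,0),(0,-1),(0,1)]: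
--                     queue.append((cy + dy, cx + dx))
--         return coords
--
--     for y in range(len(grid)):
--         for x in range(len(grid[y])):
--             if not visited[y][x]:
--                 val = grid[y][x]
--                 shape_coords = bfs(y, x, val)
--                 if len(shape_coords) > 1:
--                     min_y = min(c[0] for c in shape_coords)
--                     min_x = min(c[1] for c in shape_coords)
--                     normalized = sorted([(cy - min_y, cx - min_x) for cy, cx in shape_coords])
--                     shapes.append((val, normalized))
--     return shapes
-- ===== SOURCE B (Python) =====
-- def extract_shapes_with_value(grid):
--     cells = [(y, x) for y in range(len(grid)) for x in range(len(grid[y]))]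
--     n = len(cells)
--
--     def component(y, x):
--         v = grid[y][x]
--         c = {(y, x)}
--         for _ in range(n):
--             c = c | {(ny, nx)
--                      for (cy, cx) in c
--                      for (ny, nx) in ((cy - 1, cx), (cy + 1, cx), (cy, cx - 1), (cy, cx + 1))
--                      if 0 <= ny < len(grid) and 0 <= nx < len(grid[ny]) and grid[ny][nx] == v}
--         return c
--
--     shapes = []
--     for (y, x) in cells:
--         c = component(y, x)
--         if len(c) > 1 and min(c) == (y, x):
--             min_y = min(cy for cy, cx in c)
--             min_x = min(cx for cy, cx in c)
--             shapes.append((grid[y][x], sorted((cy - min_y, cx - min_x) for cy, cx in c)))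
--     return shapes
-- ===== Notes on version B (the rewrite author's own statement) =====
-- stated objective: alternative
-- what changed: A's stateful BFS flood fill with a shared visited matrix is replaced by a stateless per-cell computation: each cell's component is obtained by saturating a set under same-value neighbour expansion, and a shape is emitted exactly at the row-major-minimal cell of each size>1 component.
import Mathlib
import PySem

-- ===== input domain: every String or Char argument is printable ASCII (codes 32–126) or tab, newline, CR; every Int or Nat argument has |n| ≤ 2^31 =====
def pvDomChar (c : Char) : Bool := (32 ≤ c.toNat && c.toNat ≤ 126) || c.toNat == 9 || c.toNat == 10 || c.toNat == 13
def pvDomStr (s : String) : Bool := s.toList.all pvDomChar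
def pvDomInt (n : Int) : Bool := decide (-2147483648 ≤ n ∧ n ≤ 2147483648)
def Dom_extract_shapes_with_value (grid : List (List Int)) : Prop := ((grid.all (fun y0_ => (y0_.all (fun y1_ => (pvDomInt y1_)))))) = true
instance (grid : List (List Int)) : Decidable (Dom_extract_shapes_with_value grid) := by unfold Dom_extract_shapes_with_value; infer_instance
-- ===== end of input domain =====

-- ===== PORT A =====
-- header: B replaces A's stateful BFS flood fill by a stateless per-cell closure computation (objective: alternative, not faster).

-- A-side helpers: the termination measure for the BFS loop (number of unvisited cells).
def pvFalseCount (vis : List (List Bool)) : Nat :=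
  (vis.map (fun r => r.countP (fun b => b == false))).sum

theorem pvFalseCount_mark_lt (vis : List (List Bool)) (y x : Nat)
    (h : ((vis.getD y []).getD x true) = false) :
    pvFalseCount (vis.modify y (fun row => row.set x true)) < pvFalseCount vis := by
  simp only [pvFalseCount]
  induction vis generalizing y with
  | nil => simp at h
  | cons r rest ih =>
    cases y with
    | zero =>
      simp only [List.getD_cons_zero] at h
      have hx : x < r.length := by
        by_contra hx
        rw [List.getD_eq_getElem?_getD, List.getElem?_eq_none (by omega)] at h
        simp at h
      have hval : r[x] = false := by
        rw [List.getD_eq_getElem?_getD, List.getElem?_eq_getElem hx] at h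
        simpa using h
      rw [List.modify_zero_cons]
      simp only [List.map_cons, List.sum_cons]
      have hset := List.countP_set (p := fun b => b == false) (l := r) (a := true) hx
      have hpos : 0 < r.countP (fun b => b == false) :=
        List.countP_pos_iff.mpr ⟨r[x], List.getElem_mem hx, by rw [hval]; rfl⟩
      rw [hval] at hset
      simp only [show ((false == false) = true) = True by simp, if_true,
        show ((true == false) = true) = False by simp, if_false] at hset
      omega
    | succ n =>
      rw [List.modify_succ_cons]
      simp only [List.map_cons, List.sum_cons]
      have := ih n (by simpa using h)
      omega

-- the BFS inner function of A: queue, visited matrix, accumulated coords.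
-- `visited[cy][cx]` is read with default `true` (out-of-shape counts as visited); the Python
-- checks grid bounds first and visited has grid's shape, so the default is never consulted.
def bfsA (grid : List (List Int)) (value : Int) :
    List (Int × Int) → List (List Bool) → List (Int × Int) → List (Int × Int) × List (List Bool)
  | [], vis, coords => (coords, vis)
  | (cy, cx) :: q, vis, coords =>
    if h : 0 ≤ cy ∧ cy < (grid.length : Int) ∧ 0 ≤ cx ∧ cx < ((grid.getD cy.toNat []).length : Int)
        ∧ ((vis.getD cy.toNat []).getD cx.toNat true) = false
        ∧ (grid.getD cy.toNat []).getD cx.toNat 0 = value then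
      bfsA grid value (q ++ [(cy - 1, cx), (cy + 1, cx), (cy, cx - 1), (cy, cx + 1)])
        (vis.modify cy.toNat (fun row => row.set cx.toNat true)) (coords ++ [(cy, cx)])
    else
      bfsA grid value q vis coords
  termination_by q vis _ => (pvFalseCount vis, q.length)
  decreasing_by
  · exact Prod.Lex.left _ _ (pvFalseCount_mark_lt vis cy.toNat cx.toNat h.2.2.2.2.1)
  · exact Prod.Lex.right _ (by simp)

def extract_shapes_with_value (grid : List (List Int)) : List (Int × (List (Int × Int))) :=
  ((List.range grid.length).foldl
    (fun (st : List (List Bool) × List (Int × (List (Int × Int)))) y =>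
      (List.range (grid.getD y []).length).foldl
        (fun st x =>
          if ((st.1.getD y []).getD x true) = false then
            let val := (grid.getD y []).getD x 0
            let res := bfsA grid val [((y : Int), (x : Int))] st.1 []
            if 1 < res.1.length then
              let min_y := (PySem.List.min? (res.1.map Prod.fst) (fun w => w)).getD 0
              let min_x := (PySem.List.min? (res.1.map Prod.snd) (fun w => w)).getD 0
              (res.2, st.2 ++ [(val,
                PySem.List.sorted2 (res.1.map (fun c => (c.1 - min_y, c.2 - min_x))) Prod.fst Prod.snd)])
            else (res.2, st.2)
          else st)
        st)
    (grid.map (fun row => row.map (fun _ => false)), [])).2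

-- ===== PORT B =====
-- B-side helpers (Source B's code, step for step).
def pvNbrs (c : Int × Int) : List (Int × Int) :=
  [(c.1 - 1, c.2), (c.1 + 1, c.2), (c.1, c.2 - 1), (c.1, c.2 + 1)]

def pvGoodB (grid : List (List Int)) (v : Int) (c : Int × Int) : Bool :=
  decide (0 ≤ c.1 ∧ c.1 < (grid.length : Int) ∧ 0 ≤ c.2 ∧ c.2 < ((grid.getD c.1.toNat []).length : Int))
    && ((grid.getD c.1.toNat []).getD c.2.toNat 0 == v)

-- one saturation step:  c | {valid same-value neighbours of c}
def pvExpand (grid : List (List Int)) (v : Int) (c : PySem.Set (Int × Int)) : PySem.Set (Int × Int) :=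
  PySem.Set.union c (PySem.Set.ofList (c.flatMap (fun p => (pvNbrs p).filter (fun q => pvGoodB grid v q))))

def pvComponentB (grid : List (List Int)) (n : Nat) (y x : Int) : PySem.Set (Int × Int) :=
  let v := (grid.getD y.toNat []).getD x.toNat 0
  (List.range n).foldl (fun c _ => pvExpand grid v c) (PySem.Set.ofList [(y, x)])

def pvCells (grid : List (List Int)) : List (Int × Int) :=
  (List.range grid.length).flatMap (fun y =>
    (List.range (grid.getD y []).length).map (fun x => ((y : Int), (x : Int))))

def extract_shapes_with_value_alt (grid : List (List Int)) : List (Int × (List (Int × Int))) :=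
  let cells := pvCells grid
  let n := cells.length
  cells.foldl (fun shapes c =>
    let comp := pvComponentB grid n c.1 c.2
    if 1 < comp.length ∧ PySem.List.min2? comp Prod.fst Prod.snd = some c then
      let min_y := (PySem.List.min? (comp.map Prod.fst) (fun w => w)).getD 0
      let min_x := (PySem.List.min? (comp.map Prod.snd) (fun w => w)).getD 0
      shapes ++ [(((grid.getD c.1.toNat []).getD c.2.toNat 0),
        PySem.List.sorted2 (comp.map (fun p => (p.1 - min_y, p.2 - min_x))) Prod.fst Prod.snd)]
    else shapes) []

-- ===== PRECONDITION & SPEC =====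
def Spec_extract_shapes_with_value (grid : List (List Int)) (out : List (Int × (List (Int × Int)))) : Prop := out = extract_shapes_with_value_alt grid
instance (grid : List (List Int)) (out : List (Int × (List (Int × Int)))) : Decidable (Spec_extract_shapes_with_value grid out) := by unfold Spec_extract_shapes_with_value; infer_instance

-- ===== CLAIM (what is proved, stated in full; the proofs are below) =====
def Claim_equal_extract_shapes_with_value : Prop := ∀ (grid : List (List Int)), Dom_extract_shapes_with_value grid → Spec_extract_shapes_with_value grid (extract_shapes_with_value grid)

-- ===== LEMMAS AND PROOFS =====

-- ================= proof layer =================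

def pvOfN (p : Nat × Nat) : Int × Int := ((p.1 : Int), (p.2 : Int))

def pvInb (grid : List (List Int)) (c : Int × Int) : Prop :=
  0 ≤ c.1 ∧ c.1 < (grid.length : Int) ∧ 0 ≤ c.2 ∧ c.2 < ((grid.getD c.1.toNat []).length : Int)

def pvVal (grid : List (List Int)) (c : Int × Int) : Int :=
  (grid.getD c.1.toNat []).getD c.2.toNat 0

def pvStep (grid : List (List Int)) (a b : Int × Int) : Prop :=
  pvInb grid a ∧ pvInb grid b ∧ b ∈ pvNbrs a ∧ pvVal grid a = pvVal grid b

def pvReach (grid : List (List Int)) : (Int × Int) → (Int × Int) → Prop :=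
  Relation.ReflTransGen (pvStep grid)

theorem pvNbrs_symm {a b : Int × Int} (h : b ∈ pvNbrs a) : a ∈ pvNbrs b := by
  obtain ⟨a1, a2⟩ := a; obtain ⟨b1, b2⟩ := b
  simp only [pvNbrs, List.mem_cons, List.not_mem_nil, Prod.mk.injEq, or_false] at h ⊢
  omega

theorem pvStep_symm {grid : List (List Int)} : Symmetric (pvStep grid) := by
  intro a b ⟨ha, hb, hn, hv⟩
  exact ⟨hb, ha, pvNbrs_symm hn, hv.symm⟩

theorem pvReach_symm {grid : List (List Int)} {a b : Int × Int} (h : pvReach grid a b) :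
    pvReach grid b a := Relation.ReflTransGen.symmetric pvStep_symm h

theorem pvReach_dest {grid : List (List Int)} {a b : Int × Int} (h : pvReach grid a b) :
    b = a ∨ (pvInb grid b ∧ pvVal grid a = pvVal grid b) := by
  induction h with
  | refl => exact Or.inl rfl
  | tail hr hs ih =>
    rcases ih with h | ⟨hi, hv⟩
    · exact Or.inr ⟨hs.2.1, h ▸ hs.2.2.2⟩
    · exact Or.inr ⟨hs.2.1, hv.trans hs.2.2.2⟩

theorem pvReach_inb {grid : List (List Int)} {a b : Int × Int} (ha : pvInb grid a)
    (h : pvReach grid a b) : pvInb grid b := by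
  rcases pvReach_dest h with h | ⟨hi, _⟩
  · exact h ▸ ha
  · exact hi

theorem pvReach_val {grid : List (List Int)} {a b : Int × Int}
    (h : pvReach grid a b) : pvVal grid a = pvVal grid b := by
  rcases pvReach_dest h with h | ⟨_, hv⟩
  · exact h ▸ rfl
  · exact hv

-- visited-matrix lookup
def pvLook (vis : List (List Bool)) (c : Int × Int) : Bool :=
  (vis.getD c.1.toNat []).getD c.2.toNat true

def pvShapeOk (grid : List (List Int)) (vis : List (List Bool)) : Prop :=
  vis.length = grid.length ∧ ∀ i, (vis.getD i []).length = (grid.getD i []).length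

def pvMark (vis : List (List Bool)) (c : Int × Int) : List (List Bool) :=
  vis.modify c.1.toNat (fun row => row.set c.2.toNat true)

theorem pvGetDGetD (vis : List (List Bool)) (c : Int × Int) :
    pvLook vis c = ((vis[c.1.toNat]?.getD [])[c.2.toNat]?).getD true := by
  simp [pvLook, List.getD_eq_getElem?_getD]

theorem pvShapeOk_init (grid : List (List Int)) :
    pvShapeOk grid (grid.map (fun row => row.map (fun _ => false))) := by
  refine ⟨by simp, fun i => ?_⟩
  simp only [List.getD_eq_getElem?_getD, List.getElem?_map]
  cases grid[i]? <;> simp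

theorem pvInb_toNat {grid : List (List Int)} {c : Int × Int} (hc : pvInb grid c) :
    c.1.toNat < grid.length ∧ c.2.toNat < (grid.getD c.1.toNat []).length := by
  obtain ⟨h1, h2, h3, h4⟩ := hc; omega

theorem pvLook_init (grid : List (List Int)) (c : Int × Int) (hc : pvInb grid c) :
    pvLook (grid.map (fun row => row.map (fun _ => false))) c = false := by
  obtain ⟨hy, hx⟩ := pvInb_toNat hc
  rw [List.getD_eq_getElem?_getD, List.getElem?_eq_getElem hy] at hx
  simp only [Option.getD_some] at hx
  rw [pvGetDGetD, List.getElem?_map, List.getElem?_eq_getElem hy]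
  simp only [Option.map_some, Option.getD_some]
  rw [List.getElem?_eq_getElem (by simpa using hx)]
  simp

theorem pvShapeOk_bounds {grid : List (List Int)} {vis : List (List Bool)} {c : Int × Int}
    (hs : pvShapeOk grid vis) (hc : pvInb grid c) :
    c.1.toNat < vis.length ∧ c.2.toNat < (vis.getD c.1.toNat []).length := by
  obtain ⟨h1, h2⟩ := hs
  obtain ⟨hy, hx⟩ := pvInb_toNat hc
  exact ⟨by omega, by rw [h2]; exact hx⟩

theorem pvShapeOk_mark {grid : List (List Int)} {vis : List (List Bool)} {c : Int × Int}
    (hs : pvShapeOk grid vis) : pvShapeOk grid (pvMark vis c) := by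
  obtain ⟨h1, h2⟩ := hs
  refine ⟨by simpa [pvMark] using h1, fun i => ?_⟩
  rw [← h2 i, pvMark, List.getD_eq_getElem?_getD, List.getD_eq_getElem?_getD,
    List.getElem?_modify]
  cases h : vis[i]? with
  | none => simp
  | some row =>
    simp only [Option.map_eq_map, Option.map_some, Option.getD_some]
    split <;> simp

theorem pvLook_mark_self {grid : List (List Int)} {vis : List (List Bool)} {c : Int × Int}
    (hs : pvShapeOk grid vis) (hc : pvInb grid c) : pvLook (pvMark vis c) c = true := by
  obtain ⟨hy, hx⟩ := pvShapeOk_bounds hs hc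
  rw [List.getD_eq_getElem?_getD, List.getElem?_eq_getElem hy] at hx
  simp only [Option.getD_some] at hx
  rw [pvGetDGetD, pvMark, List.getElem?_modify, List.getElem?_eq_getElem hy]
  simp only [Option.map_eq_map, Option.map_some, Option.getD_some, if_pos rfl, if_true]
  rw [List.getElem?_set, if_pos rfl]
  simp [hx]

theorem pvLook_mark_other {grid : List (List Int)} {vis : List (List Bool)} {c d : Int × Int}
    (hs : pvShapeOk grid vis) (hc : pvInb grid c) (hd : pvInb grid d) (hne : d ≠ c) :
    pvLook (pvMark vis c) d = pvLook vis d := by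
  obtain ⟨hy, hx⟩ := pvShapeOk_bounds hs hc
  rw [pvGetDGetD, pvGetDGetD, pvMark, List.getElem?_modify]
  by_cases hrow : c.1.toNat = d.1.toNat
  · have hceq : c.1 = d.1 := by
      have := hc.1; have := hd.1; omega
    have hcol : c.2.toNat ≠ d.2.toNat := by
      have h2c := hc.2.2.1; have h2d := hd.2.2.1
      intro h
      exact hne (Prod.ext hceq.symm (by omega))
    rw [← hrow, List.getElem?_eq_getElem hy]
    simp only [Option.map_eq_map, Option.map_some, Option.getD_some, if_pos rfl, if_true]
    rw [List.getElem?_set, if_neg hcol]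
  · simp [if_neg hrow]


-- unvisited chains
def pvGoodU (grid : List (List Int)) (vis : List (List Bool)) (v : Int) (q : Int × Int) : Prop :=
  pvInb grid q ∧ pvVal grid q = v ∧ pvLook vis q = false

def pvStepU (grid : List (List Int)) (vis : List (List Bool)) (a b : Int × Int) : Prop :=
  pvStep grid a b ∧ pvLook vis a = false ∧ pvLook vis b = false

def pvChain (grid : List (List Int)) (vis : List (List Bool)) (v : Int) (q d : Int × Int) : Prop :=
  pvGoodU grid vis v q ∧ Relation.ReflTransGen (pvStepU grid vis) q d

theorem pvChain_surgery {grid : List (List Int)} {vis : List (List Bool)} {v : Int} {c : Int × Int}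
    (hs : pvShapeOk grid vis) (hcInb : pvInb grid c) :
    ∀ {a d : Int × Int}, pvChain grid vis v a d →
      d = c ∨ (a ≠ c ∧ pvChain grid (pvMark vis c) v a d) ∨
        (∃ m ∈ pvNbrs c, pvChain grid (pvMark vis c) v m d) := by
  intro a d ⟨hg, hrt⟩
  induction hrt using Relation.ReflTransGen.head_induction_on with
  | refl =>
    by_cases hdc : d = c
    · exact Or.inl hdc
    · refine Or.inr (Or.inl ⟨hdc, ⟨hg.1, hg.2.1, ?_⟩, .refl⟩)
      rw [pvLook_mark_other hs hcInb hg.1 hdc]; exact hg.2.2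
  | head h' hrt' ih =>
    rename_i a' b
    have hgb : pvGoodU grid vis v b := ⟨h'.1.2.1, h'.1.2.2.2 ▸ hg.2.1, h'.2.2⟩
    rcases ih hgb with hd | ⟨hbc, hchain'⟩ | third
    · exact Or.inl hd
    · by_cases hac : a' = c
      · exact Or.inr (Or.inr ⟨b, hac ▸ h'.1.2.2.1, hchain'⟩)
      · refine Or.inr (Or.inl ⟨hac, ⟨hg.1, hg.2.1, ?_⟩, .head ⟨h'.1, ?_, ?_⟩ hchain'.2⟩)
        · rw [pvLook_mark_other hs hcInb hg.1 hac]; exact hg.2.2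
        · rw [pvLook_mark_other hs hcInb hg.1 hac]; exact hg.2.2
        · rw [pvLook_mark_other hs hcInb hgb.1 hbc]; exact hgb.2.2
    · exact Or.inr (Or.inr third)

theorem pvBool_false {b : Bool} (h : ¬ b = true) : b = false := by cases b <;> simp_all

theorem bfsA_master (grid : List (List Int)) (v : Int) (vis0 : List (List Bool)) (s : Int × Int)
    (hsInb : pvInb grid s)
    (hclosed : ∀ a b, pvInb grid a → pvLook vis0 a = true → pvStep grid a b → pvLook vis0 b = true) :
    ∀ Q vis coords,
      pvShapeOk grid vis →
      coords.Nodup →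
      (∀ c ∈ coords, pvReach grid s c) →
      (∀ c, pvInb grid c → (pvLook vis c = true ↔ (pvLook vis0 c = true ∨ c ∈ coords))) →
      (∀ q ∈ Q, pvInb grid q → pvVal grid q = v → pvLook vis0 q = false → pvReach grid s q) →
      (∀ d, pvReach grid s d → d ∈ coords ∨ ∃ q ∈ Q, pvChain grid vis v q d) →
      pvShapeOk grid (bfsA grid v Q vis coords).2 ∧
      (bfsA grid v Q vis coords).1.Nodup ∧
      (∀ c, c ∈ (bfsA grid v Q vis coords).1 ↔ pvReach grid s c) ∧
      (∀ c, pvInb grid c →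
        (pvLook (bfsA grid v Q vis coords).2 c = true ↔
          (pvLook vis0 c = true ∨ c ∈ (bfsA grid v Q vis coords).1))) := by
  intro Q vis coords
  induction Q, vis, coords using bfsA.induct grid v with
  | case1 vis coords =>
    intro hshape hnd hcr hliff hq hcomp
    rw [bfsA]
    refine ⟨hshape, hnd, fun c => ⟨fun hc => hcr c hc, fun hc => ?_⟩, hliff⟩
    rcases hcomp c hc with h | ⟨q, hq', _⟩
    · exact h
    · exact absurd hq' (List.not_mem_nil)
  | case2 cy cx q vis coords h ih =>
    intro hshape hnd hcr hliff hq hcomp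
    rw [bfsA, dif_pos h]
    set cc : Int × Int := (cy, cx) with hcc
    have hInb_cc : pvInb grid cc := ⟨h.1, h.2.1, h.2.2.1, h.2.2.2.1⟩
    have hLook_cc : pvLook vis cc = false := h.2.2.2.2.1
    have hVal_cc : pvVal grid cc = v := h.2.2.2.2.2
    have hnotv : ¬ (pvLook vis0 cc = true ∨ cc ∈ coords) := by
      intro hmem
      rw [← hliff cc hInb_cc] at hmem
      rw [hLook_cc] at hmem; exact Bool.false_ne_true hmem
    have hV0cc : pvLook vis0 cc = false := pvBool_false (fun ht => hnotv (Or.inl ht))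
    have hcc_nm : cc ∉ coords := fun hm => hnotv (Or.inr hm)
    have hReach_cc : pvReach grid s cc := hq cc List.mem_cons_self hInb_cc hVal_cc hV0cc
    have hmark : (vis.modify cy.toNat fun row => row.set cx.toNat true) = pvMark vis cc := rfl
    have hnbrs : [(cy - 1, cx), (cy + 1, cx), (cy, cx - 1), (cy, cx + 1)] = pvNbrs cc := rfl
    apply ih
    · rw [hmark]; exact pvShapeOk_mark hshape
    · simp only [List.nodup_append, List.nodup_singleton, true_and, and_true]
      refine ⟨hnd, ?_⟩
      intro a ha b hb
      rw [List.mem_singleton] at hb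
      subst hb
      exact fun hab => hcc_nm (hab ▸ ha)
    · intro c hcm
      rcases List.mem_append.1 hcm with hcm | hcm
      · exact hcr c hcm
      · rw [List.mem_singleton.1 hcm]; exact hReach_cc
    · intro c hcInb
      rw [hmark]
      by_cases hceq : c = cc
      · subst hceq
        rw [pvLook_mark_self hshape hInb_cc]
        simp
      · rw [pvLook_mark_other hshape hInb_cc hcInb hceq, hliff c hcInb]
        simp only [List.mem_append, List.mem_singleton, hceq, or_false]
    · intro q' hq' hInbq hValq hV0q
      rcases List.mem_append.1 hq' with hq' | hq'
      · exact hq q' (List.mem_cons_of_mem _ hq') hInbq hValq hV0q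
      · rw [hnbrs] at hq'
        exact hReach_cc.tail ⟨hInb_cc, hInbq, hq', hVal_cc.trans hValq.symm⟩
    · intro d hd
      rcases hcomp d hd with hdc | ⟨q0, hq0, hchain⟩
      · exact Or.inl (List.mem_append_left _ hdc)
      · rw [hmark] at *
        rcases pvChain_surgery hshape hInb_cc hchain with hdeq | ⟨hne, hchain'⟩ | ⟨m, hm, hchain'⟩
        · exact Or.inl (List.mem_append_right _ (by simp [hdeq]))
        · rcases List.mem_cons.1 hq0 with rfl | hq0
          · exact absurd rfl hne
          · exact Or.inr ⟨q0, List.mem_append_left _ hq0, hchain'⟩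
        · exact Or.inr ⟨m, List.mem_append_right _ (hnbrs ▸ hm), hchain'⟩
  | case3 cy cx q vis coords h ih =>
    intro hshape hnd hcr hliff hq hcomp
    rw [bfsA, dif_neg h]
    apply ih hshape hnd hcr hliff
    · intro q' hq' hInbq hValq hV0q
      exact hq q' (List.mem_cons_of_mem _ hq') hInbq hValq hV0q
    · intro d hd
      rcases hcomp d hd with hdc | ⟨q0, hq0, hchain⟩
      · exact Or.inl hdc
      · rcases List.mem_cons.1 hq0 with rfl | hq0
        · exfalso
          obtain ⟨⟨g1, g2, g3, g4⟩, gval, glook⟩ := hchain.1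
          exact h ⟨g1, g2, g3, g4, glook, gval⟩
        · exact Or.inr ⟨q0, hq0, hchain⟩

-- row-major cell enumeration (Nat coordinates)
def pvCellsN (grid : List (List Int)) : List (Nat × Nat) :=
  (List.range grid.length).flatMap (fun y =>
    (List.range (grid.getD y []).length).map (fun x => (y, x)))

def pvLexN (p q : Nat × Nat) : Prop := p.1 < q.1 ∨ (p.1 = q.1 ∧ p.2 < q.2)

theorem pvCells_eq (grid : List (List Int)) : pvCells grid = (pvCellsN grid).map pvOfN := by
  rw [pvCellsN, List.map_flatMap, pvCells]
  congr 1
  funext y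
  have h : ∀ (l : List Nat),
      List.map (fun x => (((y : Int)), x)) (List.flatMap (fun a => [((a : Nat) : Int)]) l)
        = List.map (fun x => (((y : Int)), ((x : Nat) : Int))) l := by
    intro l
    induction l with
    | nil => rfl
    | cons a l ih => simp_all
  simpa [pvOfN, Function.comp_def] using h _

theorem pvPairwise_flatMap (g : Nat → List (Nat × Nat))
    (hg : ∀ y, (g y).Pairwise pvLexN) (htag : ∀ y p, p ∈ g y → p.1 = y) :
    ∀ n, ((List.range n).flatMap g).Pairwise pvLexN := by
  intro n
  induction n with
  | zero => simp
  | succ n ih =>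
    rw [List.range_succ, List.flatMap_append]
    rw [List.pairwise_append]
    refine ⟨ih, by simpa using hg n, ?_⟩
    intro a ha b hb
    rcases List.mem_flatMap.1 ha with ⟨y, hy, hay⟩
    rw [List.mem_range] at hy
    simp only [List.flatMap_cons, List.flatMap_nil, List.append_nil] at hb
    exact Or.inl (by rw [htag y a hay, htag n b hb]; exact hy)

theorem pvPairwise_cellsN (grid : List (List Int)) : (pvCellsN grid).Pairwise pvLexN := by
  apply pvPairwise_flatMap
  · intro y
    apply List.pairwise_map.mpr
    exact List.pairwise_lt_range.imp (fun h => Or.inr ⟨rfl, h⟩)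
  · intro y p hp
    rcases List.mem_map.1 hp with ⟨x, _, rfl⟩
    rfl

theorem pvMem_cellsN {grid : List (List Int)} {p : Nat × Nat} :
    p ∈ pvCellsN grid ↔ p.1 < grid.length ∧ p.2 < (grid.getD p.1 []).length := by
  obtain ⟨a, b⟩ := p
  simp only [pvCellsN, List.mem_flatMap, List.mem_range, List.mem_map]
  constructor
  · rintro ⟨y, hy, x, hx, heq⟩
    cases heq
    exact ⟨hy, hx⟩
  · rintro ⟨h1, h2⟩
    exact ⟨a, h1, b, h2, rfl⟩

theorem pvInb_ofN {grid : List (List Int)} {p : Nat × Nat} :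
    pvInb grid (pvOfN p) ↔ p ∈ pvCellsN grid := by
  rw [pvMem_cellsN]
  obtain ⟨a, b⟩ := p
  simp only [pvInb, pvOfN, Int.toNat_natCast]
  omega

theorem pvInb_toCell {grid : List (List Int)} {d : Int × Int} (hd : pvInb grid d) :
    ∃ p ∈ pvCellsN grid, pvOfN p = d := by
  refine ⟨(d.1.toNat, d.2.toNat), ?_, ?_⟩
  · rw [← pvInb_ofN]
    have he : pvOfN (d.1.toNat, d.2.toNat) = d := by
      simp [pvOfN, Prod.ext_iff, Int.toNat_of_nonneg hd.1, Int.toNat_of_nonneg hd.2.2.1]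
    rw [he]; exact hd
  · simp [pvOfN, Prod.ext_iff, Int.toNat_of_nonneg hd.1, Int.toNat_of_nonneg hd.2.2.1]

theorem pvLex_ofN {p q : Nat × Nat} :
    pvLexN p q ↔ toLex (pvOfN p) < toLex (pvOfN q) := by
  rw [Prod.Lex.toLex_lt_toLex]
  obtain ⟨a, b⟩ := p; obtain ⟨c, d⟩ := q
  simp only [pvLexN, pvOfN]
  constructor
  · rintro (h | ⟨h1, h2⟩)
    · exact Or.inl (by exact_mod_cast h)
    · exact Or.inr ⟨by exact_mod_cast h1, by exact_mod_cast h2⟩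
  · rintro (h | ⟨h1, h2⟩)
    · exact Or.inl (by exact_mod_cast h)
    · exact Or.inr ⟨by exact_mod_cast h1, by exact_mod_cast h2⟩

-- comparator bridges:  Python tuple comparison = the Lex order on Int × Int
theorem pvCmpB_eq (x m : Int × Int) :
    (decide (x.1 < m.1) || (!decide (m.1 < x.1) && decide (x.2 < m.2)))
      = decide (toLex x < toLex m) := by
  rw [Bool.eq_iff_iff]
  simp only [Bool.or_eq_true, Bool.and_eq_true, Bool.not_eq_true', decide_eq_true_eq,
    decide_eq_false_iff_not, Prod.Lex.toLex_lt_toLex]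
  omega

theorem pvMin2_eq (xs : List (Int × Int)) :
    PySem.List.min2? xs Prod.fst Prod.snd
      = PySem.List.min? xs (fun p => (toLex p : Lex (Int × Int))) := by
  simp only [PySem.List.min2?, PySem.List.min?]
  apply PySem.List.foldl_congr_mem
  intro acc x _
  cases acc with
  | none => rfl
  | some m => simp only [pvCmpB_eq, decide_eq_true_eq]

theorem pvSorted2_eq (xs : List (Int × Int)) :
    PySem.List.sorted2 xs Prod.fst Prod.snd
      = PySem.List.sorted xs (fun p => (toLex p : Lex (Int × Int))) := by
  rw [PySem.List.sorted_eq_foldl_insertBy]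
  simp only [PySem.List.sorted2]
  apply PySem.List.foldl_congr_mem
  intro acc x _
  congr 1
  funext a b
  exact pvCmpB_eq a b

theorem pvMin?_eq_some {α κ : Type} [LinearOrder κ] {xs : List α} {key : α → κ}
    (hinj : Function.Injective key) {c : α} (hc : c ∈ xs)
    (hmin : ∀ d ∈ xs, key c ≤ key d) : PySem.List.min? xs key = some c := by
  cases h : PySem.List.min? xs key with
  | none =>
    rw [PySem.List.min?_eq_none_iff] at h
    rw [h] at hc
    exact absurd hc (List.not_mem_nil)
  | some m =>
    have h1 := PySem.List.min?_isMin h c hc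
    have h2 := hmin m (PySem.List.min?_mem h)
    rw [hinj (le_antisymm h1 h2)]

theorem pvMin?_perm {α κ : Type} [LinearOrder κ] {xs ys : List α} {key : α → κ}
    (hinj : Function.Injective key) (hperm : xs.Perm ys) :
    PySem.List.min? xs key = PySem.List.min? ys key := by
  cases h : PySem.List.min? xs key with
  | none =>
    rw [PySem.List.min?_eq_none_iff] at h
    subst h
    rw [List.nil_perm] at hperm
    subst hperm
    rfl
  | some m =>
    have hm := PySem.List.min?_mem h
    cases h2 : PySem.List.min? ys key with
    | none =>
      rw [PySem.List.min?_eq_none_iff] at h2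
      subst h2
      rw [List.perm_nil] at hperm
      simp [hperm] at hm
    | some m' =>
      have hm' := PySem.List.min?_mem h2
      have l1 := PySem.List.min?_isMin h m' (hperm.symm.subset hm')
      have l2 := PySem.List.min?_isMin h2 m (hperm.subset hm)
      rw [hinj (le_antisymm l1 l2)]

-- ===== saturation (port B's component computation) =====

theorem pvGoodB_iff {grid : List (List Int)} {v : Int} {c : Int × Int} :
    pvGoodB grid v c = true ↔ pvInb grid c ∧ pvVal grid c = v := by
  simp [pvGoodB, pvInb, pvVal]

theorem pvExpand_subset {grid : List (List Int)} {v : Int} {c : PySem.Set (Int × Int)}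
    {x : Int × Int} (hx : x ∈ c) : x ∈ pvExpand grid v c :=
  (PySem.Set.mem_union _ _ _).2 (Or.inl hx)

theorem pvExpand_nodup {grid : List (List Int)} {v : Int} {c : PySem.Set (Int × Int)}
    (hc : c.Nodup) : (pvExpand grid v c).Nodup :=
  PySem.Set.nodup_union _ _ hc

theorem pvExpand_sound {grid : List (List Int)} {s : Int × Int} (hs : pvInb grid s)
    {c : PySem.Set (Int × Int)} (hc : ∀ e ∈ c, pvReach grid s e) :
    ∀ e ∈ pvExpand grid (pvVal grid s) c, pvReach grid s e := by
  intro e he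
  rcases (PySem.Set.mem_union _ _ _).1 he with he | he
  · exact hc e he
  · rw [PySem.Set.mem_ofList] at he
    rcases List.mem_flatMap.1 he with ⟨p, hp, hef⟩
    rw [List.mem_filter] at hef
    obtain ⟨hnb, hgood⟩ := hef
    obtain ⟨heInb, heVal⟩ := pvGoodB_iff.1 hgood
    have hrp := hc p hp
    have hpInb := pvReach_inb hs hrp
    have hpVal := pvReach_val hrp
    exact hrp.tail ⟨hpInb, heInb, hnb, by rw [← hpVal, heVal]⟩

theorem pvExpand_closed {grid : List (List Int)} {s : Int × Int} (hs : pvInb grid s)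
    {S : PySem.Set (Int × Int)} (hfix : pvExpand grid (pvVal grid s) S = S)
    (hS : ∀ e ∈ S, pvReach grid s e) :
    ∀ d e, d ∈ S → pvStep grid d e → e ∈ S := by
  intro d e hd hstep
  rw [← hfix]
  apply (PySem.Set.mem_union _ _ _).2
  right
  rw [PySem.Set.mem_ofList]
  apply List.mem_flatMap.2
  refine ⟨d, hd, List.mem_filter.2 ⟨hstep.2.2.1, pvGoodB_iff.2 ⟨hstep.2.1, ?_⟩⟩⟩
  rw [← hstep.2.2.2, ← pvReach_val (hS d hd)]

theorem pvExpand_fix_or_grow {grid : List (List Int)} {v : Int} {S : PySem.Set (Int × Int)} :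
    pvExpand grid v S = S ∨ S.length < (pvExpand grid v S).length := by
  by_cases hnew : ∀ y ∈ PySem.Set.ofList (S.flatMap (fun p => (pvNbrs p).filter (fun q => pvGoodB grid v q))), y ∈ S
  · left
    rw [pvExpand, PySem.Set.union, PySem.Set.update_eq_append_filter, PySem.Set.ofList_ofList]
    rw [List.filter_eq_nil_iff.2, List.append_nil]
    intro a ha
    simp [PySem.Set.contains_iff]
    exact hnew a ha
  · right
    push_neg at hnew
    obtain ⟨y, hy, hymem⟩ := hnew
    rw [pvExpand, PySem.Set.union, PySem.Set.update_eq_append_filter, PySem.Set.ofList_ofList,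
      List.length_append]
    have : 0 < (List.filter (fun y => !S.contains y) (PySem.Set.ofList (S.flatMap (fun p => (pvNbrs p).filter (fun q => pvGoodB grid v q))))).length := by
      rw [List.length_pos_iff]
      intro hnil
      have h2 := List.filter_eq_nil_iff.1 hnil y hy
      simp [PySem.Set.contains_iff] at h2
      exact hymem h2
    omega

theorem pvNodup_subset_length {α : Type} [DecidableEq α] {l m : List α}
    (hl : l.Nodup) (hsub : ∀ x ∈ l, x ∈ m) : l.length ≤ m.length := by
  calc l.length = l.toFinset.card := (List.toFinset_card_of_nodup hl).symm
    _ ≤ m.toFinset.card := Finset.card_le_card (fun x hx => by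
        rw [List.mem_toFinset] at *
        exact hsub x hx)
    _ ≤ m.length := List.toFinset_card_le m

def pvIter (grid : List (List Int)) (v : Int) (S0 : PySem.Set (Int × Int)) (k : Nat) :
    PySem.Set (Int × Int) :=
  (List.range k).foldl (fun c _ => pvExpand grid v c) S0

theorem pvIter_succ (grid : List (List Int)) (v : Int) (S0 : PySem.Set (Int × Int)) (k : Nat) :
    pvIter grid v S0 (k + 1) = pvExpand grid v (pvIter grid v S0 k) := by
  rw [pvIter, List.range_succ, List.foldl_append]
  rfl

theorem pvIter_nodup {grid : List (List Int)} {v : Int} {S0 : PySem.Set (Int × Int)}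
    (h0 : S0.Nodup) (k : Nat) : (pvIter grid v S0 k).Nodup := by
  induction k with
  | zero => exact h0
  | succ k ih => rw [pvIter_succ]; exact pvExpand_nodup ih

theorem pvIter_sound {grid : List (List Int)} {s : Int × Int} (hs : pvInb grid s)
    {S0 : PySem.Set (Int × Int)} (h0 : ∀ e ∈ S0, pvReach grid s e) (k : Nat) :
    ∀ e ∈ pvIter grid (pvVal grid s) S0 k, pvReach grid s e := by
  induction k with
  | zero => exact h0
  | succ k ih => rw [pvIter_succ]; exact pvExpand_sound hs ih

theorem pvIter_mem_mono {grid : List (List Int)} {v : Int} {S0 : PySem.Set (Int × Int)}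
    {x : Int × Int} (hx : x ∈ S0) (k : Nat) : x ∈ pvIter grid v S0 k := by
  induction k with
  | zero => exact hx
  | succ k ih => rw [pvIter_succ]; exact pvExpand_subset ih

theorem pvIter_fix_or_card (grid : List (List Int)) (v : Int) (s : Int × Int) :
    ∀ k, pvExpand grid v (pvIter grid v (PySem.Set.ofList [s]) k) = pvIter grid v (PySem.Set.ofList [s]) k
      ∨ k + 1 ≤ (pvIter grid v (PySem.Set.ofList [s]) k).length := by
  intro k
  induction k with
  | zero => exact Or.inr (by rfl)
  | succ k ih =>
    rcases ih with hfix | hcard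
    · left
      rw [pvIter_succ, hfix, hfix]
    · rcases pvExpand_fix_or_grow (grid := grid) (v := v) (S := pvIter grid v (PySem.Set.ofList [s]) k) with hfix | hgrow
      · left
        rw [pvIter_succ, hfix, hfix]
      · right
        rw [pvIter_succ]
        omega

theorem pvComponentB_spec (grid : List (List Int)) (s : Int × Int) (hs : pvInb grid s) :
    (pvComponentB grid (pvCells grid).length s.1 s.2).Nodup ∧
    ∀ d, d ∈ pvComponentB grid (pvCells grid).length s.1 s.2 ↔ pvReach grid s d := by
  have hceq : pvComponentB grid (pvCells grid).length s.1 s.2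
      = pvIter grid (pvVal grid s) (PySem.Set.ofList [s]) (pvCells grid).length := rfl
  have h0 : ∀ e ∈ PySem.Set.ofList [s], pvReach grid s e := by
    intro e he
    rw [PySem.Set.mem_ofList, List.mem_singleton] at he
    exact he ▸ Relation.ReflTransGen.refl
  have h0nd : (PySem.Set.ofList [s] : PySem.Set (Int × Int)).Nodup := PySem.Set.nodup_ofList _
  set n := (pvCells grid).length with hn
  have hsound := pvIter_sound hs h0 n
  have hnd := pvIter_nodup (grid := grid) (v := pvVal grid s) h0nd n
  have hbound : (pvIter grid (pvVal grid s) (PySem.Set.ofList [s]) n).length ≤ n := by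
    apply pvNodup_subset_length hnd
    intro x hx
    have hinx := pvReach_inb hs (hsound x hx)
    obtain ⟨p, hp, hpe⟩ := pvInb_toCell hinx
    rw [pvCells_eq]
    exact List.mem_map.2 ⟨p, hp, hpe⟩
  have hfix : pvExpand grid (pvVal grid s) (pvIter grid (pvVal grid s) (PySem.Set.ofList [s]) n)
      = pvIter grid (pvVal grid s) (PySem.Set.ofList [s]) n := by
    rcases pvIter_fix_or_card grid (pvVal grid s) s n with h | h
    · exact h
    · omega
  rw [hceq]
  refine ⟨hnd, fun d => ⟨hsound d, fun hd => ?_⟩⟩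
  induction hd with
  | refl =>
    exact pvIter_mem_mono ((PySem.Set.mem_ofList _ _).2 (List.mem_singleton.2 rfl)) n
  | tail hr hst ih =>
    exact pvExpand_closed hs hfix hsound _ _ ih hst

-- ===== the two top-level loops as folds over the row-major cell list =====

def pvBodyA (grid : List (List Int))
    (st : List (List Bool) × List (Int × (List (Int × Int)))) (p : Nat × Nat) :
    List (List Bool) × List (Int × (List (Int × Int))) :=
  if ((st.1.getD p.1 []).getD p.2 true) = false then
    let val := (grid.getD p.1 []).getD p.2 0
    let res := bfsA grid val [((p.1 : Int), (p.2 : Int))] st.1 []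
    if 1 < res.1.length then
      let min_y := (PySem.List.min? (res.1.map Prod.fst) (fun w => w)).getD 0
      let min_x := (PySem.List.min? (res.1.map Prod.snd) (fun w => w)).getD 0
      (res.2, st.2 ++ [(val,
        PySem.List.sorted2 (res.1.map (fun c => (c.1 - min_y, c.2 - min_x))) Prod.fst Prod.snd)])
    else (res.2, st.2)
  else st

def pvBodyB (grid : List (List Int)) (n : Nat)
    (shapes : List (Int × (List (Int × Int)))) (c : Int × Int) :
    List (Int × (List (Int × Int))) :=
  if 1 < (pvComponentB grid n c.1 c.2).length ∧
      PySem.List.min2? (pvComponentB grid n c.1 c.2) Prod.fst Prod.snd = some c then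
    shapes ++ [(((grid.getD c.1.toNat []).getD c.2.toNat 0),
      PySem.List.sorted2 ((pvComponentB grid n c.1 c.2).map
        (fun q => (q.1 - (PySem.List.min? ((pvComponentB grid n c.1 c.2).map Prod.fst) (fun w => w)).getD 0,
                   q.2 - (PySem.List.min? ((pvComponentB grid n c.1 c.2).map Prod.snd) (fun w => w)).getD 0)))
        Prod.fst Prod.snd)]
  else shapes

theorem pvA_eq_fold (grid : List (List Int)) :
    extract_shapes_with_value grid
      = ((pvCellsN grid).foldl (pvBodyA grid)
          (grid.map (fun row => row.map (fun _ => false)), [])).2 := by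
  rw [extract_shapes_with_value, pvCellsN, List.foldl_flatMap]
  simp only [List.foldl_map]
  rfl

theorem pvB_eq_fold (grid : List (List Int)) :
    extract_shapes_with_value_alt grid
      = (pvCellsN grid).foldl
          (fun sh p => pvBodyB grid (pvCells grid).length sh (pvOfN p)) [] := by
  rw [extract_shapes_with_value_alt]
  rw [show pvCells grid = (pvCellsN grid).map pvOfN from pvCells_eq grid]
  rw [List.foldl_map, List.length_map]
  rfl

theorem pvLook_ofN (vis : List (List Bool)) (p : Nat × Nat) :
    pvLook vis (pvOfN p) = (vis.getD p.1 []).getD p.2 true := by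
  simp [pvLook, pvOfN]

theorem pvVal_ofN (grid : List (List Int)) (p : Nat × Nat) :
    pvVal grid (pvOfN p) = (grid.getD p.1 []).getD p.2 0 := by
  simp [pvVal, pvOfN]

theorem pvSplit_lex {grid : List (List Int)} {pr t : List (Nat × Nat)} {p : Nat × Nat}
    (hsplit : pvCellsN grid = pr ++ p :: t) :
    (∀ q ∈ pr, pvLexN q p) ∧ (∀ q ∈ t, pvLexN p q) := by
  have hpw := pvPairwise_cellsN grid
  rw [hsplit, List.pairwise_append] at hpw
  obtain ⟨h1, h2, h3⟩ := hpw
  rw [List.pairwise_cons] at h2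
  exact ⟨fun q hq => h3 q hq p List.mem_cons_self, h2.1⟩

theorem pvSorted2_perm_eq {xs ys : List (Int × Int)} (h : xs.Perm ys) :
    PySem.List.sorted2 xs Prod.fst Prod.snd = PySem.List.sorted2 ys Prod.fst Prod.snd := by
  rw [pvSorted2_eq, pvSorted2_eq]
  apply PySem.List.eq_of_perm_of_pairwise_le_of_injective
    (key := fun p => (toLex p : Lex (Int × Int))) toLex.injective
  · exact (PySem.List.sorted_perm _ _ _).trans (h.trans (PySem.List.sorted_perm _ _ _).symm)
  · exact PySem.List.sorted_pairwise _ _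
  · exact PySem.List.sorted_pairwise _ _

theorem pvMain (grid : List (List Int)) :
    ∀ (t pr : List (Nat × Nat)) (visA : List (List Bool))
      (shapes : List (Int × (List (Int × Int)))),
      pvCellsN grid = pr ++ t →
      pvShapeOk grid visA →
      (∀ c, pvInb grid c → (pvLook visA c = true ↔ ∃ p ∈ pr, pvReach grid (pvOfN p) c)) →
      (t.foldl (pvBodyA grid) (visA, shapes)).2
        = t.foldl (fun sh p => pvBodyB grid (pvCells grid).length sh (pvOfN p)) shapes := by
  intro t
  induction t with
  | nil => intros; rfl
  | cons p t ih =>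
    intro pr visA shapes hsplit hshape hliff
    have hpmem : p ∈ pvCellsN grid := by rw [hsplit]; exact List.mem_append_right _ List.mem_cons_self
    have hpinb : pvInb grid (pvOfN p) := pvInb_ofN.2 hpmem
    obtain ⟨hlexPr, hlexT⟩ := pvSplit_lex hsplit
    have compspec := pvComponentB_spec grid (pvOfN p) hpinb
    simp only [List.foldl_cons]
    by_cases hvis : pvLook visA (pvOfN p) = true
    · -- A already visited this cell: both sides skip
      obtain ⟨q0, hq0, hr0⟩ := (hliff (pvOfN p) hpinb).1 hvis
      have hA : pvBodyA grid (visA, shapes) p = (visA, shapes) := by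
        simp only [pvBodyA]
        rw [if_neg (by rw [← pvLook_ofN]; simp [hvis])]
      have hq0comp : pvOfN q0 ∈ pvComponentB grid (pvCells grid).length (pvOfN p).1 (pvOfN p).2 :=
        (compspec.2 _).2 (pvReach_symm hr0)
      have hmin : ¬ (PySem.List.min2? (pvComponentB grid (pvCells grid).length (pvOfN p).1 (pvOfN p).2)
          Prod.fst Prod.snd = some (pvOfN p)) := by
        intro heq
        rw [pvMin2_eq] at heq
        have hle := PySem.List.min?_isMin heq (pvOfN q0) hq0comp
        have hlt := pvLex_ofN.1 (hlexPr q0 hq0)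
        exact absurd hle (not_le.2 hlt)
      have hB : pvBodyB grid (pvCells grid).length shapes (pvOfN p) = shapes := by
        simp only [pvBodyB]
        rw [if_neg (fun hc => hmin hc.2)]
      rw [hA, hB]
      apply ih (pr ++ [p]) visA shapes (by rw [hsplit, List.append_assoc]; rfl) hshape
      intro c hc
      rw [hliff c hc]
      constructor
      · rintro ⟨q, hq, hr⟩
        exact ⟨q, List.mem_append_left _ hq, hr⟩
      · rintro ⟨q, hq, hr⟩
        rcases List.mem_append.1 hq with hq | hq
        · exact ⟨q, hq, hr⟩
        · rw [List.mem_singleton] at hq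
          subst hq
          exact ⟨q0, hq0, hr0.trans hr⟩
    · -- A visits: run the BFS
      have hvisF : pvLook visA (pvOfN p) = false := pvBool_false hvis
      have hclosed : ∀ a b, pvInb grid a → pvLook visA a = true → pvStep grid a b →
          pvLook visA b = true := by
        intro a b ha hla hstep
        obtain ⟨q, hq, hr⟩ := (hliff a ha).1 hla
        exact (hliff b hstep.2.1).2 ⟨q, hq, hr.tail hstep⟩
      have hallunvis : ∀ e, pvReach grid (pvOfN p) e → pvLook visA e = false := by
        intro e he
        apply pvBool_false
        intro hlt
        obtain ⟨q, hq, hr⟩ := (hliff e (pvReach_inb hpinb he)).1 hlt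
        exact hvis ((hliff (pvOfN p) hpinb).2 ⟨q, hq, hr.trans (pvReach_symm he)⟩)
      have hmaster := bfsA_master grid (pvVal grid (pvOfN p)) visA (pvOfN p) hpinb hclosed
        [pvOfN p] visA [] hshape (List.nodup_nil) (by simp)
        (by intro c _; simp)
        (by
          intro q hq _ _ _
          rw [List.mem_singleton] at hq
          subst hq
          exact Relation.ReflTransGen.refl)
        (by
          intro d hd
          refine Or.inr ⟨pvOfN p, List.mem_singleton.2 rfl, ⟨hpinb, rfl, hvisF⟩, ?_⟩
          induction hd with
          | refl => exact Relation.ReflTransGen.refl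
          | tail hr hstep ih2 =>
            exact ih2.tail ⟨hstep, hallunvis _ hr, hallunvis _ (hr.tail hstep)⟩)
      obtain ⟨hshape', hnd', hmem', hlook'⟩ := hmaster
      set res := bfsA grid (pvVal grid (pvOfN p)) [pvOfN p] visA [] with hres
      have hperm : res.1.Perm (pvComponentB grid (pvCells grid).length (pvOfN p).1 (pvOfN p).2) := by
        rw [List.perm_ext_iff_of_nodup hnd' compspec.1]
        intro a
        rw [hmem' a, compspec.2 a]
      have hminB : PySem.List.min2? (pvComponentB grid (pvCells grid).length (pvOfN p).1 (pvOfN p).2)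
          Prod.fst Prod.snd = some (pvOfN p) := by
        rw [pvMin2_eq]
        apply pvMin?_eq_some toLex.injective ((compspec.2 _).2 Relation.ReflTransGen.refl)
        intro d hd
        have hrd := (compspec.2 d).1 hd
        obtain ⟨pd, hpd, hpde⟩ := pvInb_toCell (pvReach_inb hpinb hrd)
        rw [hsplit] at hpd
        rcases List.mem_append.1 hpd with hpd | hpd
        · exfalso
          have : pvLook visA (pvOfN p) = true :=
            (hliff (pvOfN p) hpinb).2 ⟨pd, hpd, hpde ▸ pvReach_symm hrd⟩
          exact hvis this
        · rcases List.mem_cons.1 hpd with rfl | hpd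
          · rw [hpde]
          · exact le_of_lt (hpde ▸ pvLex_ofN.1 (hlexT pd hpd))
      have hWitLiff : ∀ c, pvInb grid c →
          (pvLook res.2 c = true ↔ ∃ q ∈ pr ++ [p], pvReach grid (pvOfN q) c) := by
        intro c hc
        rw [hlook' c hc, hliff c hc, hmem' c]
        constructor
        · rintro (⟨q, hq, hr⟩ | hr)
          · exact ⟨q, List.mem_append_left _ hq, hr⟩
          · exact ⟨p, List.mem_append_right _ (List.mem_singleton.2 rfl), hr⟩
        · rintro ⟨q, hq, hr⟩
          rcases List.mem_append.1 hq with hq | hq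
          · exact Or.inl ⟨q, hq, hr⟩
          · rw [List.mem_singleton] at hq
            subst hq
            exact Or.inr hr
      have hsplit' : pvCellsN grid = (pr ++ [p]) ++ t := by rw [hsplit, List.append_assoc]; rfl
      have hcondA : ((visA.getD p.1 []).getD p.2 true) = false := by
        rw [← pvLook_ofN]; exact hvisF
      by_cases hlen : 1 < res.1.length
      · have hlenB : 1 < (pvComponentB grid (pvCells grid).length (pvOfN p).1 (pvOfN p).2).length := by
          rw [← hperm.length_eq]; exact hlen
        have hminy : PySem.List.min? (res.1.map Prod.fst) (fun w => w)
            = PySem.List.min? ((pvComponentB grid (pvCells grid).length (pvOfN p).1 (pvOfN p).2).map Prod.fst) (fun w => w) :=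
          pvMin?_perm (fun a b h => h) (hperm.map _)
        have hminx : PySem.List.min? (res.1.map Prod.snd) (fun w => w)
            = PySem.List.min? ((pvComponentB grid (pvCells grid).length (pvOfN p).1 (pvOfN p).2).map Prod.snd) (fun w => w) :=
          pvMin?_perm (fun a b h => h) (hperm.map _)
        have hA : pvBodyA grid (visA, shapes) p = (res.2, shapes ++
            [(pvVal grid (pvOfN p),
              PySem.List.sorted2 ((pvComponentB grid (pvCells grid).length (pvOfN p).1 (pvOfN p).2).map
                (fun q => (q.1 - (PySem.List.min? ((pvComponentB grid (pvCells grid).length (pvOfN p).1 (pvOfN p).2).map Prod.fst) (fun w => w)).getD 0,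
                           q.2 - (PySem.List.min? ((pvComponentB grid (pvCells grid).length (pvOfN p).1 (pvOfN p).2).map Prod.snd) (fun w => w)).getD 0)))
                Prod.fst Prod.snd)]) := by
          simp only [pvBodyA]
          rw [if_pos hcondA]
          rw [show (grid.getD p.1 []).getD p.2 0 = pvVal grid (pvOfN p) from (pvVal_ofN grid p).symm]
          rw [show [((p.1 : Int), (p.2 : Int))] = [pvOfN p] from rfl, ← hres]
          rw [if_pos hlen]
          rw [hminy, hminx]
          rw [pvSorted2_perm_eq (List.Perm.map _ hperm)]
        have hB : pvBodyB grid (pvCells grid).length shapes (pvOfN p) = shapes ++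
            [(pvVal grid (pvOfN p),
              PySem.List.sorted2 ((pvComponentB grid (pvCells grid).length (pvOfN p).1 (pvOfN p).2).map
                (fun q => (q.1 - (PySem.List.min? ((pvComponentB grid (pvCells grid).length (pvOfN p).1 (pvOfN p).2).map Prod.fst) (fun w => w)).getD 0,
                           q.2 - (PySem.List.min? ((pvComponentB grid (pvCells grid).length (pvOfN p).1 (pvOfN p).2).map Prod.snd) (fun w => w)).getD 0)))
                Prod.fst Prod.snd)] := by
          simp only [pvBodyB]
          rw [if_pos ⟨hlenB, hminB⟩]
          rfl
        rw [hA, hB]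
        exact ih (pr ++ [p]) res.2 _ hsplit' hshape' hWitLiff
      · have hlenB : ¬ 1 < (pvComponentB grid (pvCells grid).length (pvOfN p).1 (pvOfN p).2).length := by
          rw [← hperm.length_eq]; exact hlen
        have hA : pvBodyA grid (visA, shapes) p = (res.2, shapes) := by
          simp only [pvBodyA]
          rw [if_pos hcondA]
          rw [show (grid.getD p.1 []).getD p.2 0 = pvVal grid (pvOfN p) from (pvVal_ofN grid p).symm]
          rw [show [((p.1 : Int), (p.2 : Int))] = [pvOfN p] from rfl, ← hres]
          rw [if_neg hlen]
        have hB : pvBodyB grid (pvCells grid).length shapes (pvOfN p) = shapes := by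
          simp only [pvBodyB]
          rw [if_neg (fun hc => hlenB hc.1)]
        rw [hA, hB]
        exact ih (pr ++ [p]) res.2 _ hsplit' hshape' hWitLiff

-- ===== VERDICT (by name: the statement is the Claim_ definition above) =====
theorem extract_shapes_with_value_spec : Claim_equal_extract_shapes_with_value := by
  intro grid _
  show extract_shapes_with_value grid = extract_shapes_with_value_alt grid
  rw [pvA_eq_fold, pvB_eq_fold]
  apply pvMain grid (pvCellsN grid) [] _ [] (by simp) (pvShapeOk_init grid)
  intro c hc
  rw [pvLook_init grid c hc]
  simp
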